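-- pv_equiv track=rewrite | github.com/adriangmrraa/clinicforge | orchestrator_service/services/digital_records_service.py | _anamnesis_completeness
-- ===== SOURCE A (Python) =====
-- from typing import Optional
--
-- def _anamnesis_completeness(anamnesis: Optional[dict]) -> str:
--     """Return 'complete', 'partial', or 'empty' based on how many fields are filled."""
--     if anamnesis is None:
--         return "empty"
--     filled = sum(1 for v in anamnesis.values() if v is not None)
--     if filled == 0:
--         return "empty"
--     if filled == len(anamnesis):
--         return "complete"
--     return "partial"
-- ===== SOURCE B (Python) =====
-- from typing import Optional
--
--
-- def _join(a: str, b: str) -> str: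
--     """Semilattice join of two classifications: equal stays, mixed is 'partial'."""
--     return a if a == b else "partial"
--
--
-- def _classify(vals: list) -> str:
--     """Divide-and-conquer: classify each half, merge with the join."""
--     if len(vals) <= 1:
--         if not vals or vals[0] is None:
--             return "empty"
--         return "complete"
--     mid = len(vals) // 2
--     return _join(_classify(vals[:mid]), _classify(vals[mid:]))
--
--
-- def _anamnesis_completeness(anamnesis: Optional[dict]) -> str:
--     """Return 'complete', 'partial', or 'empty' via a divide-and-conquer merge."""
--     if anamnesis is None:
--         return "empty"
--     return _classify(list(anamnesis.values()))
-- ===== Notes on version B (the rewrite author's own statement) =====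
-- stated objective: alternative
-- what changed: Replaces the counter-and-compare pass with a divide-and-conquer classifier: the value list is split in half, each half classified recursively, and the two classifications merged with a semilattice join (equal classifications keep their value, different ones give 'partial').
import Mathlib
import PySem

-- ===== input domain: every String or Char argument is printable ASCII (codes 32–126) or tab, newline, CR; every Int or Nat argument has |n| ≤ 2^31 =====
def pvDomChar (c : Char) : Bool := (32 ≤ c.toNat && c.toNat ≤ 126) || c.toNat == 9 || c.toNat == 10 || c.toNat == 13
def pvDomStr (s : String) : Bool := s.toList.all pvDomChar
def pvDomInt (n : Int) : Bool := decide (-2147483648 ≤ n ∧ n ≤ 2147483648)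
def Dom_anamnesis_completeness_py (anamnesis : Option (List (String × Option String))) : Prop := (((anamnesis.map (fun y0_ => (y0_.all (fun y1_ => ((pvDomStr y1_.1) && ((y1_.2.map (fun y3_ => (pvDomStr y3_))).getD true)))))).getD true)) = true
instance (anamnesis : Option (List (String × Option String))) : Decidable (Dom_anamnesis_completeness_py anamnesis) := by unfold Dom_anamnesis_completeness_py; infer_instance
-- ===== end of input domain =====

-- B replaces A's filled-field counter compared against the dict length with a
-- divide-and-conquer classifier over the value list, merging half-classifications
-- with a semilattice join (objective: alternative).


-- ===== PORT A =====
def anamnesis_completeness_py (anamnesis : Option (List (String × Option String))) : String :=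
  match anamnesis with
  | none => "empty"
  | some l =>
    let filled := l.foldl (fun acc kv => if kv.2 ≠ none then acc + 1 else acc) 0
    if filled = 0 then "empty"
    else if filled = l.length then "complete"
    else "partial"

-- ===== PORT B =====
-- _join: semilattice join of two classifications
def pvJoin (a b : String) : String := if a = b then a else "partial"

-- _classify: divide-and-conquer over the value list
def pvClassify (vals : List (Option String)) : String :=
  if vals.length ≤ 1 then
    (match vals with
     | [] => "empty"
     | v :: _ => if v = none then "empty" else "complete")
  else
    let mid := vals.length / 2
    pvJoin (pvClassify (vals.take mid)) (pvClassify (vals.drop mid))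
termination_by vals.length
decreasing_by
  · simp only [List.length_take]; omega
  · simp only [List.length_drop]; omega

def anamnesis_completeness_py_alt (anamnesis : Option (List (String × Option String))) : String :=
  match anamnesis with
  | none => "empty"
  | some l => pvClassify (l.map (fun kv => kv.2))

-- ===== PRECONDITION & SPEC =====
def Spec_anamnesis_completeness_py (anamnesis : Option (List (String × Option String))) (out : String) : Prop := out = anamnesis_completeness_py_alt anamnesis
instance (anamnesis : Option (List (String × Option String))) (out : String) : Decidable (Spec_anamnesis_completeness_py anamnesis out) := by unfold Spec_anamnesis_completeness_py; infer_instance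

-- ===== CLAIM (what is proved, stated in full; the proofs are below) =====
def Claim_equal_anamnesis_completeness_py : Prop := ∀ (anamnesis : Option (List (String × Option String))), Dom_anamnesis_completeness_py anamnesis → Spec_anamnesis_completeness_py anamnesis (anamnesis_completeness_py anamnesis)

-- ===== LEMMAS AND PROOFS =====

-- closed-form value of B's divide-and-conquer classifier
def pvSpecOf (vals : List (Option String)) : String :=
  if vals.all (· = none) then "empty"
  else if vals.all (· ≠ none) then "complete"
  else "partial"

theorem pvJoin_spec (l r : List (Option String)) (hl : l ≠ []) (hr : r ≠ []) :
    pvJoin (pvSpecOf l) (pvSpecOf r) = pvSpecOf (l ++ r) := by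
  have hlne : ¬ (l.all (· = none) = true ∧ l.all (· ≠ none) = true) := by
    rintro ⟨h1, h2⟩
    match l with
    | [] => exact hl rfl
    | x :: _ =>
      simp only [List.all_cons, Bool.and_eq_true, decide_eq_true_eq] at h1 h2
      exact h2.1 h1.1
  have hrne : ¬ (r.all (· = none) = true ∧ r.all (· ≠ none) = true) := by
    rintro ⟨h1, h2⟩
    match r with
    | [] => exact hr rfl
    | x :: _ =>
      simp only [List.all_cons, Bool.and_eq_true, decide_eq_true_eq] at h1 h2
      exact h2.1 h1.1
  unfold pvSpecOf
  rcases Bool.eq_false_or_eq_true (l.all (· = none)) with h1 | h1 <;>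
  rcases Bool.eq_false_or_eq_true (l.all (· ≠ none)) with h2 | h2 <;>
  rcases Bool.eq_false_or_eq_true (r.all (· = none)) with h3 | h3 <;>
  rcases Bool.eq_false_or_eq_true (r.all (· ≠ none)) with h4 | h4 <;>
  simp only [List.all_append, h1, h2, h3, h4, Bool.and_self, Bool.and_true] <;>
  all_goals first | decide | simp_all

theorem pvClassify_eq (vals : List (Option String)) : pvClassify vals = pvSpecOf vals := by
  induction vals using pvClassify.induct with
  | case1 h => simp [pvClassify, pvSpecOf]
  | case2 tail h =>
    have ht : tail = [] := by
      cases tail with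
      | nil => rfl
      | cons a t => simp at h
    subst ht
    rw [pvClassify.eq_def]
    simp [pvSpecOf]
  | case3 v tail hv h =>
    have ht : tail = [] := by
      cases tail with
      | nil => rfl
      | cons a t => simp at h
    subst ht
    rw [pvClassify.eq_def]
    simp [pvSpecOf, hv]
  | case4 x h mid ih1 ih2 =>
    rw [pvClassify.eq_def, if_neg h]
    have hlen : 2 ≤ x.length := by omega
    have hmidlt : x.length / 2 < x.length := by omega
    have hmidpos : 1 ≤ x.length / 2 := by omega
    simp only at ih1 ih2 ⊢
    rw [ih1, ih2, pvJoin_spec, List.take_append_drop]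
    · intro hc
      have := congrArg List.length hc
      simp only [List.length_take, List.length_nil] at this
      omega
    · intro hc
      have := congrArg List.length hc
      simp only [List.length_drop, List.length_nil] at this
      omega

theorem pv_foldl_count (l : List (String × Option String)) (n : Nat) :
    l.foldl (fun acc kv => if kv.2 ≠ none then acc + 1 else acc) n
      = n + l.countP (fun kv => decide (kv.2 ≠ none)) := by
  induction l generalizing n with
  | nil => simp
  | cons h t ih =>
    simp only [List.foldl_cons, List.countP_cons]
    rw [ih]
    by_cases hc : h.2 = none
    · simp [hc]
    · simp [hc]; omega

-- ===== VERDICT (by name: the statement is the Claim_ definition above) =====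
theorem anamnesis_completeness_py_spec : Claim_equal_anamnesis_completeness_py := by
  intro anamnesis _
  unfold Spec_anamnesis_completeness_py
  cases anamnesis with
  | none => rfl
  | some l =>
    simp only [anamnesis_completeness_py, anamnesis_completeness_py_alt]
    rw [pvClassify_eq]
    simp only [pv_foldl_count, Nat.zero_add]
    unfold pvSpecOf
    by_cases h0 : l.countP (fun kv => decide (kv.2 ≠ none)) = 0
    · have hnone : (l.map (fun kv => kv.2)).all (· = none) = true := by
        simp only [List.all_map, List.all_eq_true]
        intro x hx
        have := List.countP_eq_zero.mp h0 x hx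
        simpa using this
      rw [if_pos h0, hnone]
      simp
    · have hnone : (l.map (fun kv => kv.2)).all (· = none) = false := by
        rw [← Bool.not_eq_true]
        simp only [List.all_map, List.all_eq_true]
        intro hc
        apply h0
        rw [List.countP_eq_zero]
        intro x hx
        have := hc x hx
        simpa using this
      by_cases hall : l.countP (fun kv => decide (kv.2 ≠ none)) = l.length
      · have ha : (l.map (fun kv => kv.2)).all (· ≠ none) = true := by
          simp only [List.all_map, List.all_eq_true]
          intro x hx
          have := List.countP_eq_length.mp hall x hx
          simpa using this
        rw [if_neg h0, if_pos hall, hnone, ha]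
        simp
      · have ha : (l.map (fun kv => kv.2)).all (· ≠ none) = false := by
          rw [← Bool.not_eq_true]
          simp only [List.all_map, List.all_eq_true]
          intro hc
          exact hall (List.countP_eq_length.mpr (fun x hx => by simpa using hc x hx))
        rw [if_neg h0, if_neg hall, hnone, ha]
        simp
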